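-- pv_equiv track=rewrite | github.com/iancontijoch/aoc2016 | day11/part2.py | _canon_key
-- ===== SOURCE A (Python) =====
-- from typing import TypeAlias
--
-- Item: TypeAlias = tuple[str, str]
--
-- CanonKey: TypeAlias = tuple[int, tuple[tuple[int, int], ...]]
--
-- def _canon_key(elev: int, item_floors: dict[Item, int]) -> CanonKey:
--     pairs: list[tuple[int, int]] = []
--     elems: set[str] = {elem for _, elem in item_floors}
--     for elem in elems:
--         gf = item_floors.get(('g', elem))
--         mf = item_floors.get(('m', elem))
--         if gf is None or mf is None:
--             continue
--         pairs.append((gf, mf))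
--     pairs.sort()
--     return (elev, tuple(pairs))
-- ===== SOURCE B (Python) =====
-- def _canon_key(elev, item_floors):
--     # Keep only generator/microchip entries, rekeyed (elem, kind, floor), and sort by
--     # (elem, kind): since 'g' < 'm', a complete element becomes an adjacent (g, m) run,
--     # so adjacent entries sharing an element are exactly the complete pairs.
--     seq = sorted(
--         ((elem, kind, fl) for (kind, elem), fl in item_floors.items()
--          if kind in ('g', 'm')),
--         key=lambda t: (t[0], t[1]),
--     )
--     pairs = sorted((a[2], b[2]) for a, b in zip(seq, seq[1:]) if a[0] == b[0])
--     return (elev, tuple(pairs))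
-- ===== Notes on version B (the rewrite author's own statement) =====
-- stated objective: alternative
-- what changed: Instead of building an element-name set and probing the dict twice per element, B filters to g/m entries, sorts them once by (element, kind) and pairs adjacent entries that share an element (since 'g' < 'm', a complete element is an adjacent generator/microchip run), then sorts the pairs.
import Mathlib
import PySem

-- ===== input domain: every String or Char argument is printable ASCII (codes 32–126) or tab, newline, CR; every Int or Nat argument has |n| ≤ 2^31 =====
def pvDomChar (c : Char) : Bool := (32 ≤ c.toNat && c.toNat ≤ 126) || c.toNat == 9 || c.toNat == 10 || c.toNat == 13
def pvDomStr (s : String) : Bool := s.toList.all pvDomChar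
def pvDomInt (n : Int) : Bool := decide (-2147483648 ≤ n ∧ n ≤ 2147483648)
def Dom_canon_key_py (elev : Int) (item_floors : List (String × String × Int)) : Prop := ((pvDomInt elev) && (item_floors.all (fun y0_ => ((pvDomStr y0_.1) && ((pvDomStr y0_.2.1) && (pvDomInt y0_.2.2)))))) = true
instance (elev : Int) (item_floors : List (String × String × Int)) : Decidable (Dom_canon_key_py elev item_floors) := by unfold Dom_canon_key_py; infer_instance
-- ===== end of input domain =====

-- B replaces A's name-set + double dict probe with a sort-then-adjacent-scan: keep only
-- g/m entries, sort by (element, kind), pair adjacent entries sharing an element (idiomatic; same cost).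


-- ===== PORT A =====
-- the dict[Item, int] argument, in its PySem.Dict form (key = (kind, elem), value = floor)
def pvDictA (item_floors : List (String × String × Int)) : PySem.Dict (String × String) Int :=
  { items := item_floors.map (fun y => ((y.1, y.2.1), y.2.2)) }

def canon_key_py (elev : Int) (item_floors : List (String × String × Int)) : Int × (List (Int × Int)) :=
  let d := pvDictA item_floors
  -- elems = {elem for _, elem in item_floors}
  let elems : PySem.Set String := PySem.Set.ofList (item_floors.map (fun y => y.2.1))
  -- for elem in elems: gf = get(('g', elem)); mf = get(('m', elem)); skip if either None
  let pairs : List (Int × Int) :=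
    elems.foldl (fun pairs e =>
      let gf := PySem.Dict.get? d ("g", e)
      let mf := PySem.Dict.get? d ("m", e)
      match gf, mf with
      | some gf, some mf => pairs ++ [(gf, mf)]
      | _, _ => pairs) []
  (elev, PySem.List.sorted2 pairs (fun p => p.1) (fun p => p.2))

-- ===== PORT B =====
def canon_key_py_alt (elev : Int) (item_floors : List (String × String × Int)) : Int × (List (Int × Int)) :=
  -- seq = sorted(((elem, kind, fl) for (kind, elem), fl in items if kind in ('g','m')), key=(t[0],t[1]))
  let seq : List (String × String × Int) :=
    PySem.List.sorted2
      (item_floors.filterMap (fun y =>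
        if y.1 == "g" || y.1 == "m" then some (y.2.1, y.1, y.2.2) else none))
      (fun t => t.1) (fun t => t.2.1)
  -- pairs = sorted((a[2], b[2]) for a, b in zip(seq, seq[1:]) if a[0] == b[0])
  let pairs : List (Int × Int) :=
    (seq.zip (PySem.List.slice seq (some 1))).filterMap (fun ab =>
      if ab.1.1 == ab.2.1 then some (ab.1.2.2, ab.2.2.2) else none)
  (elev, PySem.List.sorted2 pairs (fun p => p.1) (fun p => p.2))

-- ===== PRECONDITION & SPEC =====
-- Pre_ excludes association lists with a duplicate (kind, elem) key: such lists cannot arise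
-- from the Python dict argument, and first-match vs positional behaviour on that
-- representation corner is an artefact no caller can observe.
def Pre_canon_key_py (elev : Int) (item_floors : List (String × String × Int)) : Prop :=
  (item_floors.map (fun y => (y.1, y.2.1))).Nodup
instance (elev : Int) (item_floors : List (String × String × Int)) : Decidable (Pre_canon_key_py elev item_floors) := by unfold Pre_canon_key_py; infer_instance

def pvWitness_canon_key_py : Int × (List (String × String × Int)) :=
  (2, [("g", "h", 1), ("m", "h", 3), ("g", "li", 2)])

def Spec_canon_key_py (elev : Int) (item_floors : List (String × String × Int)) (out : Int × (List (Int × Int))) : Prop := out = canon_key_py_alt elev item_floors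
instance (elev : Int) (item_floors : List (String × String × Int)) (out : Int × (List (Int × Int))) : Decidable (Spec_canon_key_py elev item_floors out) := by unfold Spec_canon_key_py; infer_instance

-- ===== CLAIM (what is proved, stated in full; the proofs are below) =====
def Claim_equal_canon_key_py : Prop := ∀ (elev : Int) (item_floors : List (String × String × Int)), Dom_canon_key_py elev item_floors → Pre_canon_key_py elev item_floors → Spec_canon_key_py elev item_floors (canon_key_py elev item_floors)

-- ===== LEMMAS AND PROOFS =====

-- first-match lookups of ('g', e) / ('m', e) in the original dict
def pvGLook (item_floors : List (String × String × Int)) (e : String) : Option Int :=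
  PySem.Dict.get? (pvDictA item_floors) ("g", e)
def pvMLook (item_floors : List (String × String × Int)) (e : String) : Option Int :=
  PySem.Dict.get? (pvDictA item_floors) ("m", e)

-- the pair contributed by element e (if both its items exist), without / with the element name
def pvF (item_floors : List (String × String × Int)) (e : String) : Option (Int × Int) :=
  match pvGLook item_floors e, pvMLook item_floors e with
  | some gf, some mf => some (gf, mf)
  | _, _ => none
def pvFE (item_floors : List (String × String × Int)) (e : String) : Option (String × Int × Int) :=
  match pvGLook item_floors e, pvMLook item_floors e with
  | some gf, some mf => some (e, gf, mf)
  | _, _ => none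

def pvElems (item_floors : List (String × String × Int)) : PySem.Set String :=
  PySem.Set.ofList (item_floors.map (fun y => y.2.1))

def pvAE (item_floors : List (String × String × Int)) : List (String × Int × Int) :=
  (pvElems item_floors).filterMap (pvFE item_floors)

-- B's filtered list and its sorted form
def pvSeq0 (item_floors : List (String × String × Int)) : List (String × String × Int) :=
  item_floors.filterMap (fun y =>
    if y.1 == "g" || y.1 == "m" then some (y.2.1, y.1, y.2.2) else none)
def pvSeq (item_floors : List (String × String × Int)) : List (String × String × Int) :=
  PySem.List.sorted2 (pvSeq0 item_floors) (fun t => t.1) (fun t => t.2.1)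

-- the adjacent scan, keeping the element name
def pvScanE (L : List (String × String × Int)) : List (String × Int × Int) :=
  (L.zip L.tail).filterMap (fun ab =>
    if ab.1.1 = ab.2.1 then some (ab.1.1, ab.1.2.2, ab.2.2.2) else none)

-- strict (element, kind) lexicographic order
def pvKlt (a b : String × String × Int) : Prop :=
  a.1 < b.1 ∨ (a.1 = b.1 ∧ a.2.1 < b.2.1)

-- string comparison facts
theorem pv_not_m_lt_g : ¬ ("m" : String) < "g" := by
  simp [String.lt_iff_toList_lt]; decide

-- sorted2 is sorted by the lexicographic key
theorem pv_sorted2_eq_lex {α κ₁ κ₂ : Type} [LinearOrder κ₁] [LinearOrder κ₂]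
    (xs : List α) (k1 : α → κ₁) (k2 : α → κ₂) :
    PySem.List.sorted2 xs k1 k2 = PySem.List.sorted xs (fun x => toLex (k1 x, k2 x)) := by
  have hcomp : (fun a b => decide (k1 a < k1 b) || (!decide (k1 b < k1 a) && decide (k2 a < k2 b)))
      = fun a b => decide (toLex (k1 a, k2 a) < toLex (k1 b, k2 b)) := by
    funext a b
    rw [Bool.eq_iff_iff]
    simp only [Bool.or_eq_true, Bool.and_eq_true, Bool.not_eq_true', decide_eq_true_eq,
      decide_eq_false_iff_not, Prod.Lex.lt_iff, ofLex_toLex]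
    constructor
    · rintro (h | ⟨h1, h2⟩)
      · exact Or.inl h
      · rcases lt_trichotomy (k1 a) (k1 b) with h | h | h
        · exact Or.inl h
        · exact Or.inr ⟨h, h2⟩
        · exact absurd h h1
    · rintro (h | ⟨h1, h2⟩)
      · exact Or.inl h
      · exact Or.inr ⟨by simp [h1], h2⟩
  show List.foldl (fun acc x => PySem.List.insertBy
      (fun a b => decide (k1 a < k1 b) || (!decide (k1 b < k1 a) && decide (k2 a < k2 b))) x acc) [] xs
    = List.foldl (fun acc x => PySem.List.insertBy
      (fun a b => decide (toLex (k1 a, k2 a) < toLex (k1 b, k2 b))) x acc) [] xs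
  rw [hcomp]

theorem pv_sorted2_perm_eq (xs ys : List (Int × Int)) (h : xs.Perm ys) :
    PySem.List.sorted2 xs (fun p => p.1) (fun p => p.2) =
    PySem.List.sorted2 ys (fun p => p.1) (fun p => p.2) := by
  rw [pv_sorted2_eq_lex, pv_sorted2_eq_lex]
  refine PySem.List.sorted_eq_sorted_of_perm xs ys _ ?_ h
  intro a b hab
  simpa using congrArg ofLex hab

-- ---- A's loop is a filterMap over the element set ----
theorem pv_foldA (ifs : List (String × String × Int)) :
    ∀ (l : List String) (acc : List (Int × Int)),
    l.foldl (fun pairs e =>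
      match PySem.Dict.get? (pvDictA ifs) ("g", e), PySem.Dict.get? (pvDictA ifs) ("m", e) with
      | some gf, some mf => pairs ++ [(gf, mf)]
      | _, _ => pairs) acc = acc ++ l.filterMap (pvF ifs) := by
  intro l
  induction l with
  | nil => intro acc; simp
  | cons e l ih =>
    intro acc
    simp only [List.foldl_cons, List.filterMap_cons]
    cases hg : PySem.Dict.get? (pvDictA ifs) ("g", e) with
    | none =>
      cases hm : PySem.Dict.get? (pvDictA ifs) ("m", e) with
      | none => simp [pvF, pvGLook, pvMLook, hg, hm, ih]
      | some mf => simp [pvF, pvGLook, pvMLook, hg, hm, ih]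
    | some gf =>
      cases hm : PySem.Dict.get? (pvDictA ifs) ("m", e) with
      | none => simp [pvF, pvGLook, pvMLook, hg, hm, ih]
      | some mf => simp [pvF, pvGLook, pvMLook, hg, hm, ih]

theorem pv_A_closed (elev : Int) (ifs : List (String × String × Int)) :
    canon_key_py elev ifs =
      (elev, PySem.List.sorted2 ((pvElems ifs).filterMap (pvF ifs)) (fun p => p.1) (fun p => p.2)) := by
  simp only [canon_key_py]
  rw [pv_foldA ifs (PySem.Set.ofList (ifs.map (fun y => y.2.1))) []]
  rfl

-- ---- dict lookup on nodup keys is plain membership ----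
theorem pv_get_iff (ifs : List (String × String × Int))
    (hkeys : (ifs.map (fun y => (y.1, y.2.1))).Nodup) (k e : String) (v : Int) :
    PySem.Dict.get? (pvDictA ifs) (k, e) = some v ↔ (k, e, v) ∈ ifs := by
  induction ifs with
  | nil => simp [pvDictA, PySem.Dict.get?]
  | cons y t ih =>
    obtain ⟨y1, y2, y3⟩ := y
    rw [List.map_cons] at hkeys
    obtain ⟨hku, hkt⟩ := List.nodup_cons.mp hkeys
    by_cases h1 : (y1, y2) = ((k, e) : String × String)
    · simp only [Prod.mk.injEq] at h1
      obtain ⟨rfl, rfl⟩ := h1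
      constructor
      · intro hv
        simp only [pvDictA, PySem.Dict.get?, List.map_cons, List.find?_cons, BEq.rfl,
          Option.map_some, Option.some.injEq] at hv
        subst hv
        exact List.mem_cons_self
      · intro hv
        rcases List.mem_cons.mp hv with hv | hv
        · simp only [Prod.mk.injEq] at hv
          obtain ⟨-, -, rfl⟩ := hv
          simp [pvDictA, PySem.Dict.get?]
        · exfalso
          exact hku (List.mem_map.mpr ⟨(y1, y2, v), hv, rfl⟩)
    · have hbeq : (((y1, y2) : String × String) == (k, e)) = false := by
        simp only [beq_eq_false_iff_ne, ne_eq]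
        exact h1
      have hstep : PySem.Dict.get? (pvDictA ((y1, y2, y3) :: t)) (k, e)
          = PySem.Dict.get? (pvDictA t) (k, e) := by
        simp [pvDictA, PySem.Dict.get?, hbeq]
      rw [hstep, ih hkt]
      constructor
      · intro hv; exact List.mem_cons_of_mem _ hv
      · intro hv
        rcases List.mem_cons.mp hv with hv | hv
        · exfalso
          apply h1
          simp only [Prod.mk.injEq] at hv
          exact Prod.ext hv.1.symm hv.2.1.symm
        · exact hv

-- ---- the filtered list: keys, order, kinds ----
theorem pv_seq0_keys (ifs : List (String × String × Int)) :
    (pvSeq0 ifs).map (fun t => (t.1, t.2.1)) =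
      (ifs.map (fun y => (y.1, y.2.1))).filterMap
        (fun k => if k.1 == "g" || k.1 == "m" then some (k.2, k.1) else none) := by
  rw [pvSeq0, List.map_filterMap, List.filterMap_map]
  refine List.filterMap_congr ?_
  intro y _
  by_cases h : (y.1 == "g" || y.1 == "m") = true <;> simp [Function.comp, h]

theorem pv_seq0_keys_nodup (ifs : List (String × String × Int))
    (hpre : (ifs.map (fun y => (y.1, y.2.1))).Nodup) :
    ((pvSeq0 ifs).map (fun t => (t.1, t.2.1))).Nodup := by
  rw [pv_seq0_keys]
  refine List.Nodup.filterMap ?_ hpre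
  intro a a' b hb hb'
  by_cases ha : (a.1 == "g" || a.1 == "m") = true
  · by_cases ha' : (a'.1 == "g" || a'.1 == "m") = true
    · simp only [ha, ha', if_pos, Option.mem_def, Option.some.injEq] at hb hb'
      have : (a.2, a.1) = (a'.2, a'.1) := hb.trans hb'.symm
      have h1 : a.2 = a'.2 := congrArg Prod.fst this
      have h2 : a.1 = a'.1 := congrArg Prod.snd this
      exact Prod.ext h2 h1
    · simp [ha'] at hb'
  · simp [ha] at hb

theorem pv_seq_keys_nodup (ifs : List (String × String × Int))
    (hpre : (ifs.map (fun y => (y.1, y.2.1))).Nodup) :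
    ((pvSeq ifs).map (fun t => (t.1, t.2.1))).Nodup := by
  have hperm : ((pvSeq ifs).map (fun t => (t.1, t.2.1))).Perm
      ((pvSeq0 ifs).map (fun t => (t.1, t.2.1))) :=
    (PySem.List.sorted2_perm (pvSeq0 ifs) (fun t => t.1) (fun t => t.2.1) false).map _
  exact hperm.nodup_iff.mpr (pv_seq0_keys_nodup ifs hpre)

theorem pv_seq_pairwise (ifs : List (String × String × Int))
    (hpre : (ifs.map (fun y => (y.1, y.2.1))).Nodup) :
    (pvSeq ifs).Pairwise pvKlt := by
  have hle : (pvSeq ifs).Pairwise (fun a b => toLex ((a.1 : String), (a.2.1 : String)) ≤ toLex (b.1, b.2.1)) := by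
    rw [pvSeq, pv_sorted2_eq_lex]
    exact PySem.List.sorted_pairwise (pvSeq0 ifs) (fun t => toLex (t.1, t.2.1))
  have hne : (pvSeq ifs).Pairwise (fun a b => ((a.1, a.2.1) : String × String) ≠ (b.1, b.2.1)) :=
    List.pairwise_map.mp (pv_seq_keys_nodup ifs hpre)
  refine (hle.and hne).imp ?_
  rintro a b ⟨h1, h2⟩
  rcases lt_or_eq_of_le h1 with h | h
  · rcases Prod.Lex.lt_iff.mp h with h | ⟨he, hk⟩
    · exact Or.inl h
    · exact Or.inr ⟨he, hk⟩
  · exact absurd (by simpa using congrArg ofLex h) h2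

theorem pv_seq_kinds (ifs : List (String × String × Int)) :
    ∀ t ∈ pvSeq ifs, t.2.1 = "g" ∨ t.2.1 = "m" := by
  intro t ht
  have ht0 : t ∈ pvSeq0 ifs :=
    ((PySem.List.sorted2_perm (pvSeq0 ifs) (fun t => t.1) (fun t => t.2.1) false).mem_iff).mp ht
  rw [pvSeq0, List.mem_filterMap] at ht0
  obtain ⟨y, _, hfy⟩ := ht0
  by_cases h : (y.1 == "g" || y.1 == "m") = true
  · rw [if_pos h] at hfy
    have hk : t.2.1 = y.1 := by
      have := Option.some.inj hfy
      exact (congrArg (fun z => z.2.1) this).symm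
    rw [hk]
    simpa using h
  · simp [h] at hfy

theorem pv_mem_seq (ifs : List (String × String × Int)) (e k : String) (v : Int) :
    (e, k, v) ∈ pvSeq ifs ↔ ((k = "g" ∨ k = "m") ∧ (k, e, v) ∈ ifs) := by
  have hmem : (e, k, v) ∈ pvSeq ifs ↔ (e, k, v) ∈ pvSeq0 ifs :=
    (PySem.List.sorted2_perm (pvSeq0 ifs) (fun t => t.1) (fun t => t.2.1) false).mem_iff
  rw [hmem, pvSeq0, List.mem_filterMap]
  constructor
  · rintro ⟨⟨y1, y2, y3⟩, hy, hfy⟩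
    by_cases h : (y1 == "g" || y1 == "m") = true
    · rw [if_pos h] at hfy
      simp only [Option.some.injEq, Prod.mk.injEq] at hfy
      obtain ⟨rfl, rfl, rfl⟩ := hfy
      exact ⟨by simpa using h, hy⟩
    · simp [h] at hfy
  · rintro ⟨hk, hmem'⟩
    refine ⟨(k, e, v), hmem', ?_⟩
    have h : (k == "g" || k == "m") = true := by
      rcases hk with h | h <;> simp [h]
    simp [h]

-- ---- the adjacent scan ----
theorem pv_scanE_cons2 (x y : String × String × Int) (t : List (String × String × Int)) :
    pvScanE (x :: y :: t) =
      (if x.1 = y.1 then [(x.1, x.2.2, y.2.2)] else []) ++ pvScanE (y :: t) := by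
  by_cases h : x.1 = y.1 <;> simp [pvScanE, h]

theorem pv_scanE_fst (L : List (String × String × Int)) :
    ∀ p ∈ pvScanE L, ∃ b ∈ L.tail, b.1 = p.1 := by
  intro p hp
  rw [pvScanE, List.mem_filterMap] at hp
  obtain ⟨ab, hab, hf⟩ := hp
  obtain ⟨a, b⟩ := ab
  by_cases h : a.1 = b.1
  · rw [if_pos h] at hf
    have h1 := Option.some.inj hf
    exact ⟨b, (List.of_mem_zip hab).2, by rw [← h, ← congrArg Prod.fst h1]⟩
  · simp [h] at hf

theorem pv_scanE_pairwise (L : List (String × String × Int))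
    (hs : L.Pairwise pvKlt) (hk : ∀ t ∈ L, t.2.1 = "g" ∨ t.2.1 = "m") :
    (pvScanE L).Pairwise (fun a b => a.1 < b.1) := by
  induction L with
  | nil => simp [pvScanE]
  | cons x t ih =>
    cases t with
    | nil => simp [pvScanE]
    | cons y t' =>
      obtain ⟨hx, hs'⟩ := List.pairwise_cons.mp hs
      have hrec := ih hs' (fun a ha => hk a (List.mem_cons_of_mem _ ha))
      rw [pv_scanE_cons2]
      by_cases h : x.1 = y.1
      · rw [if_pos h]
        simp only [List.singleton_append]
        refine List.pairwise_cons.mpr ⟨?_, hrec⟩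
        intro p hp
        obtain ⟨b, hb, hbe⟩ := pv_scanE_fst _ p hp
        have hyb : pvKlt y b := (List.pairwise_cons.mp hs').1 b hb
        have hxy : pvKlt x y := hx y List.mem_cons_self
        have hklt : x.2.1 < y.2.1 := by
          rcases hxy with hlt | ⟨_, hklt⟩
          · exact absurd hlt (by rw [h]; exact lt_irrefl _)
          · exact hklt
        have hym : y.2.1 = "m" := by
          rcases hk y (List.mem_cons_of_mem _ List.mem_cons_self) with hg | hm
          · exfalso
            rcases hk x List.mem_cons_self with hxg | hxm
            · rw [hxg, hg] at hklt; exact lt_irrefl _ hklt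
            · rw [hxm, hg] at hklt; exact pv_not_m_lt_g hklt
          · exact hm
        have hlt : y.1 < b.1 := by
          rcases hyb with hlt | ⟨_, hklt'⟩
          · exact hlt
          · exfalso
            rcases hk b (List.mem_cons_of_mem _ (List.mem_cons_of_mem _ hb)) with hbg | hbm
            · rw [hym, hbg] at hklt'; exact pv_not_m_lt_g hklt'
            · rw [hym, hbm] at hklt'; exact lt_irrefl _ hklt'
        show x.1 < p.1
        rw [h, ← hbe]
        exact hlt
      · rw [if_neg h]
        simpa using hrec

theorem pv_mem_scanE (L : List (String × String × Int))
    (hs : L.Pairwise pvKlt) (hk : ∀ t ∈ L, t.2.1 = "g" ∨ t.2.1 = "m")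
    (e : String) (g m : Int) :
    (e, g, m) ∈ pvScanE L ↔ ((e, "g", g) ∈ L ∧ (e, "m", m) ∈ L) := by
  induction L with
  | nil => simp [pvScanE]
  | cons x t ih =>
    cases t with
    | nil =>
      obtain ⟨x1, xk, xf⟩ := x
      constructor
      · intro hp; simp [pvScanE] at hp
      · rintro ⟨h1, h2⟩
        simp only [List.mem_singleton, Prod.mk.injEq] at h1 h2
        exfalso
        have : ("g" : String) = "m" := h1.2.1.trans h2.2.1.symm
        exact absurd this (by decide)
    | cons y t' =>
      obtain ⟨x1, xk, xf⟩ := x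
      obtain ⟨y1, yk, yf⟩ := y
      obtain ⟨hx, hs'⟩ := List.pairwise_cons.mp hs
      have hk' : ∀ a ∈ (y1, yk, yf) :: t', a.2.1 = "g" ∨ a.2.1 = "m" :=
        fun a ha => hk a (List.mem_cons_of_mem _ ha)
      have ihm := ih hs' hk'
      rw [pv_scanE_cons2]
      by_cases h : x1 = y1
      · -- x is the generator, y the microchip of the same element
        subst h
        have hxy : pvKlt (x1, xk, xf) (x1, yk, yf) := hx _ List.mem_cons_self
        have hklt : xk < yk := by
          rcases hxy with hlt | ⟨-, hklt⟩
          · exact absurd hlt (lt_irrefl _)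
          · exact hklt
        have hxg : xk = "g" := by
          rcases hk _ List.mem_cons_self with hg | hm
          · exact hg
          · exfalso
            rcases hk _ (List.mem_cons_of_mem _ List.mem_cons_self) with hg | hm'
            · rw [show xk = "m" from hm, show yk = "g" from hg] at hklt
              exact pv_not_m_lt_g hklt
            · rw [show xk = "m" from hm, show yk = "m" from hm'] at hklt
              exact lt_irrefl _ hklt
        have hym : yk = "m" := by
          rcases hk _ (List.mem_cons_of_mem _ List.mem_cons_self) with hg | hm
          · exfalso
            rw [hxg, show yk = "g" from hg] at hklt
            exact lt_irrefl _ hklt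
          · exact hm
        subst hxg; subst hym
        have htlt : ∀ z ∈ t', x1 < z.1 := by
          intro z hz
          rcases (List.pairwise_cons.mp hs').1 z hz with hlt | ⟨-, hklt'⟩
          · exact hlt
          · exfalso
            rcases hk' z (List.mem_cons_of_mem _ hz) with hg | hm
            · rw [hg] at hklt'; exact pv_not_m_lt_g hklt'
            · rw [hm] at hklt'; exact lt_irrefl _ hklt'
        rw [if_pos rfl]
        simp only [List.singleton_append, List.mem_cons, Prod.mk.injEq]
        constructor
        · rintro (⟨rfl, rfl, rfl⟩ | hmem)
          · exact ⟨by simp, by simp⟩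
          · obtain ⟨h1, h2⟩ := ihm.mp hmem
            simp only [List.mem_cons, Prod.mk.injEq] at h1 h2
            exact ⟨Or.inr h1, Or.inr h2⟩
        · rintro ⟨hg, hm⟩
          by_cases he : e = x1
          · subst he
            have hgx : g = xf := by
              rcases hg with ⟨-, -, rfl⟩ | ⟨-, habs, -⟩ | hmem
              · rfl
              · exact absurd habs.symm (by decide)
              · exact absurd (htlt _ hmem) (lt_irrefl _)
            have hmy : m = yf := by
              rcases hm with ⟨-, habs, -⟩ | ⟨-, -, rfl⟩ | hmem
              · exact absurd habs.symm (by decide)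
              · rfl
              · exact absurd (htlt _ hmem) (lt_irrefl _)
            exact Or.inl ⟨rfl, hgx, hmy⟩
          · right
            refine ihm.mpr ?_
            simp only [List.mem_cons, Prod.mk.injEq]
            constructor
            · rcases hg with ⟨habs, -⟩ | hg' | hmem
              · exact absurd habs he
              · exact Or.inl hg'
              · exact Or.inr hmem
            · rcases hm with ⟨habs, -⟩ | hm' | hmem
              · exact absurd habs he
              · exact Or.inl hm'
              · exact Or.inr hmem
      · -- x's element is strictly below everything in the tail
        have hxylt : x1 < y1 := by
          rcases hx _ List.mem_cons_self with hlt | ⟨heq, -⟩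
          · exact hlt
          · exact absurd heq h
        have hbelow : ∀ z ∈ (y1, yk, yf) :: t', x1 < z.1 := by
          intro z hz
          rcases List.mem_cons.mp hz with rfl | hz'
          · exact hxylt
          · rcases (List.pairwise_cons.mp hs').1 z hz' with hlt | ⟨heq, -⟩
            · exact lt_trans hxylt hlt
            · have heq' : y1 = z.1 := heq
              rw [← heq']; exact hxylt
        rw [if_neg h]
        simp only [List.nil_append]
        rw [ihm]
        simp only [List.mem_cons, Prod.mk.injEq]
        constructor
        · rintro ⟨h1, h2⟩
          exact ⟨Or.inr h1, Or.inr h2⟩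
        · rintro ⟨hg, hm⟩
          constructor
          · rcases hg with ⟨rfl, hgk, -⟩ | hg'
            · exfalso
              rcases hm with ⟨-, hmk, -⟩ | ⟨heq, -, -⟩ | hm'
              · exact absurd (hgk.trans hmk.symm) (by decide)
              · exact h heq
              · exact absurd (hbelow _ (List.mem_cons_of_mem _ hm')) (lt_irrefl _)
            · exact hg'
          · rcases hm with ⟨rfl, hmk, -⟩ | hm'
            · exfalso
              rcases hg with ⟨-, hgk, -⟩ | ⟨heq, -, -⟩ | hg'
              · exact absurd (hgk.trans hmk.symm) (by decide)
              · exact h heq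
              · exact absurd (hbelow _ (List.mem_cons_of_mem _ hg')) (lt_irrefl _)
            · exact hm'

-- ---- membership characterisations of both unsorted pair lists ----
theorem pv_FE_fst (ifs : List (String × String × Int)) (a : String) (b : String × Int × Int)
    (h : pvFE ifs a = some b) : b.1 = a := by
  rw [pvFE] at h
  cases hg : pvGLook ifs a with
  | none => rw [hg] at h; exact absurd h (by simp)
  | some gf =>
    cases hm : pvMLook ifs a with
    | none => rw [hg, hm] at h; exact absurd h (by simp)
    | some mf =>
      rw [hg, hm] at h
      exact (congrArg Prod.fst (Option.some.inj h)).symm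

theorem pv_AE_nodup (ifs : List (String × String × Int)) : (pvAE ifs).Nodup := by
  refine List.Nodup.filterMap ?_ (PySem.Set.nodup_ofList _)
  intro a a' b hb hb'
  rw [← pv_FE_fst ifs a b hb, pv_FE_fst ifs a' b hb']

theorem pv_mem_AE (ifs : List (String × String × Int))
    (hpre : (ifs.map (fun y => (y.1, y.2.1))).Nodup) (e : String) (g m : Int) :
    (e, g, m) ∈ pvAE ifs ↔ (pvGLook ifs e = some g ∧ pvMLook ifs e = some m) := by
  rw [pvAE, List.mem_filterMap]
  constructor
  · rintro ⟨e', _, hf⟩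
    have he : e' = e := (pv_FE_fst ifs e' _ hf).symm ▸ rfl
    subst he
    rw [pvFE] at hf
    cases hg : pvGLook ifs e' with
    | none => rw [hg] at hf; exact absurd hf (by simp)
    | some gf =>
      cases hm : pvMLook ifs e' with
      | none => rw [hg, hm] at hf; exact absurd hf (by simp)
      | some mf =>
        rw [hg, hm] at hf
        have h1 : ((e' : String), gf, mf) = ((e' : String), g, m) := Option.some.inj hf
        simp only [Prod.mk.injEq] at h1
        obtain ⟨-, rfl, rfl⟩ := h1
        exact ⟨rfl, rfl⟩
  · rintro ⟨hG, hM⟩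
    refine ⟨e, ?_, by rw [pvFE, hG, hM]⟩
    have hmem : ("g", e, g) ∈ ifs := (pv_get_iff ifs hpre "g" e g).mp hG
    rw [pvElems, PySem.Set.mem_ofList]
    exact List.mem_map.mpr ⟨("g", e, g), hmem, rfl⟩

theorem pv_mem_scan_seq (ifs : List (String × String × Int))
    (hpre : (ifs.map (fun y => (y.1, y.2.1))).Nodup) (e : String) (g m : Int) :
    (e, g, m) ∈ pvScanE (pvSeq ifs) ↔ (pvGLook ifs e = some g ∧ pvMLook ifs e = some m) := by
  rw [pv_mem_scanE (pvSeq ifs) (pv_seq_pairwise ifs hpre) (pv_seq_kinds ifs),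
    pv_mem_seq, pv_mem_seq]
  constructor
  · rintro ⟨⟨_, h1⟩, ⟨_, h2⟩⟩
    exact ⟨(pv_get_iff ifs hpre "g" e g).mpr h1, (pv_get_iff ifs hpre "m" e m).mpr h2⟩
  · rintro ⟨hG, hM⟩
    exact ⟨⟨Or.inl rfl, (pv_get_iff ifs hpre "g" e g).mp hG⟩,
           ⟨Or.inr rfl, (pv_get_iff ifs hpre "m" e m).mp hM⟩⟩

theorem pv_scan_nodup (ifs : List (String × String × Int))
    (hpre : (ifs.map (fun y => (y.1, y.2.1))).Nodup) : (pvScanE (pvSeq ifs)).Nodup := by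
  refine (pv_scanE_pairwise (pvSeq ifs) (pv_seq_pairwise ifs hpre) (pv_seq_kinds ifs)).imp ?_
  intro a b hab hEq
  rw [hEq] at hab
  exact lt_irrefl _ hab

theorem pv_perm (ifs : List (String × String × Int))
    (hpre : (ifs.map (fun y => (y.1, y.2.1))).Nodup) :
    (pvAE ifs).Perm (pvScanE (pvSeq ifs)) := by
  rw [List.perm_ext_iff_of_nodup (pv_AE_nodup ifs) (pv_scan_nodup ifs hpre)]
  rintro ⟨e, g, m⟩
  rw [pv_mem_AE ifs hpre, pv_mem_scan_seq ifs hpre]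

-- ---- both pair lists are the elementwise projections of the labelled lists ----
theorem pv_A_pairs (ifs : List (String × String × Int)) :
    (pvElems ifs).filterMap (pvF ifs) = (pvAE ifs).map (fun t => t.2) := by
  rw [pvAE, List.map_filterMap]
  refine List.filterMap_congr ?_
  intro e _
  rw [pvF, pvFE]
  cases pvGLook ifs e <;> cases pvMLook ifs e <;> rfl

theorem pv_B_pairs (seq : List (String × String × Int)) :
    (seq.zip seq.tail).filterMap (fun ab =>
      if ab.1.1 == ab.2.1 then some ((ab.1.2.2, ab.2.2.2) : Int × Int) else none) =
    (pvScanE seq).map (fun t => t.2) := by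
  rw [pvScanE, List.map_filterMap]
  refine List.filterMap_congr ?_
  intro ab _
  by_cases h : ab.1.1 = ab.2.1 <;> simp [h]

theorem pv_B_closed (elev : Int) (ifs : List (String × String × Int)) :
    canon_key_py_alt elev ifs =
      (elev, PySem.List.sorted2 ((pvScanE (pvSeq ifs)).map (fun t => t.2))
        (fun p => p.1) (fun p => p.2)) := by
  show (elev, PySem.List.sorted2
      (((pvSeq ifs).zip (PySem.List.slice (pvSeq ifs) (some 1))).filterMap (fun ab =>
        if ab.1.1 == ab.2.1 then some (ab.1.2.2, ab.2.2.2) else none))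
      (fun p => p.1) (fun p => p.2)) = _
  rw [PySem.List.slice_from (pvSeq ifs) (by norm_num), show ((1 : Int)).toNat = 1 from rfl,
    List.drop_one, pv_B_pairs]

-- ===== VERDICT (by name: the statement is the Claim_ definition above) =====
theorem canon_key_py_spec : Claim_equal_canon_key_py := by
  intro elev ifs _hdom hpre
  show canon_key_py elev ifs = canon_key_py_alt elev ifs
  rw [pv_A_closed, pv_B_closed, pv_A_pairs]
  exact congrArg (Prod.mk elev) (pv_sorted2_perm_eq _ _ ((pv_perm ifs hpre).map _))
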